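-- pv_equiv track=rewrite | github.com/kanhasahu955/python_interview_questions | dsa/python/dictionary_problems.py | word_pattern_ii
-- ===== SOURCE A (Python) =====
-- def word_pattern_ii(pattern: str, s: str) -> bool:
--     """
--     Problem:
--     Check if pattern can bijectively map to non-overlapping words in s.
--
--     Input:  pattern="aabb", s="dogdogcatcat"   Output: True
--     Input:  pattern="aabb", s="dogdogcatdog"   Output: False
--
--     Approach:
--     - Backtracking: try all splits at each step
--     - Two dicts ensure bijection: char->word and word->char
--
--     Complexity: Time O(n * m), Space O(n + m)
--
--     Debugging steps:
--     1. Print char, tried word, and both maps at each recursive step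
--     """
--     def backtrack(
--         pi: int,
--         si: int,
--         char_to_word: dict[str, str],
--         word_to_char: dict[str, str],
--     ) -> bool:
--         if pi == len(pattern) and si == len(s):
--             return True
--         if pi == len(pattern) or si == len(s):
--             return False
--
--         ch = pattern[pi]
--         if ch in char_to_word:
--             word = char_to_word[ch]
--             if not s[si:].startswith(word):
--                 return False
--             return backtrack(pi + 1, si + len(word), char_to_word, word_to_char)
--
--         for end in range(si + 1, len(s) + 1):
--             word = s[si:end]
--             if word in word_to_char:
--                 continue
--             char_to_word[ch] = word
--             word_to_char[word] = ch
--             if backtrack(pi + 1, end, char_to_word, word_to_char):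
--                 return True
--             del char_to_word[ch]
--             del word_to_char[word]
--
--         return False
--
--     return backtrack(0, 0, {}, {})
-- ===== SOURCE B (Python) =====
-- def word_pattern_ii(pattern: str, s: str) -> bool:
--     # Iterative DFS over an explicit stack of (pi, si, char_to_word, word_to_char)
--     # states; successors carry extended dict copies, so there is no undo step.
--     stack = [(0, 0, {}, {})]
--     while stack:
--         pi, si, c2w, w2c = stack.pop()
--         if pi == len(pattern) and si == len(s):
--             return True
--         if pi == len(pattern) or si == len(s):
--             continue
--         ch = pattern[pi]
--         if ch in c2w:
--             w = c2w[ch]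
--             if s.startswith(w, si):
--                 stack.append((pi + 1, si + len(w), c2w, w2c))
--             continue
--         for end in range(si + 1, len(s) + 1):
--             w = s[si:end]
--             if w in w2c:
--                 continue
--             stack.append((pi + 1, end, {**c2w, ch: w}, {**w2c, w: ch}))
--     return False
-- ===== Notes on version B (the rewrite author's own statement) =====
-- stated objective: alternative
-- what changed: Recursive backtracking with in-place dict mutation and undo (del after a failed try) is replaced by an iterative DFS over an explicit stack of (pi, si, map, reverse-map) states whose successors carry extended dict copies, so recursion and the undo step disappear.
import Mathlib
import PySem

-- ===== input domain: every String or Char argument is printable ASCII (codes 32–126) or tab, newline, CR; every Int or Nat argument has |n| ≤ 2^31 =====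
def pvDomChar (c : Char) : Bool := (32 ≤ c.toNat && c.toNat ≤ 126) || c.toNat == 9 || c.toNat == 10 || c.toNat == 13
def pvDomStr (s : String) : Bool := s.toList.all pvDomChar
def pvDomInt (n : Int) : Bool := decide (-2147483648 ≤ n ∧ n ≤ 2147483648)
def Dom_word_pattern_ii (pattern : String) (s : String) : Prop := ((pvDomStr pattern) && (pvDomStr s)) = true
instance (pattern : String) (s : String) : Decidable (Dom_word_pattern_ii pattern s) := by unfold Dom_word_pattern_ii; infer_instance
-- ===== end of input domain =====

-- B replaces A's recursive backtracking (mutate the two dicts, recurse, undo with del)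
-- by an iterative DFS over an explicit stack of (pattern-rest, s-rest, map, reverse-map)
-- states whose successors carry extended dict copies; objective: alternative decomposition,
-- same asymptotic cost.

-- ===== PORT A =====
-- A's backtrack(pi, si, …) is ported on the string suffixes pattern[pi:] / s[si:]
-- (prem / srem below); ends = range(si+1, len(s)+1) becomes the candidate word
-- lengths 1..len(srem); the Python 'del' after a failed try is Dict.erase.
mutual
def pvBtkA (prem srem : List Char) (c2w : PySem.Dict Char (List Char))
    (w2c : PySem.Dict (List Char) Char) : Bool :=
  match prem with
  | [] => srem.isEmpty            -- pi == len(pattern): true iff si == len(s)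
  | ch :: ptl =>
    if srem.isEmpty then false    -- si == len(s) but pattern left
    else
      match c2w.get? ch with
      | some w =>                 -- ch already mapped: forced word
        if w.isPrefixOf srem then pvBtkA ptl (srem.drop w.length) c2w w2c else false
      | none => pvLoopA ch ptl srem (List.range' 1 srem.length) c2w w2c
termination_by (prem.length, srem.length + 2)

def pvLoopA (ch : Char) (ptl srem : List Char) (lens : List Nat)
    (c2w : PySem.Dict Char (List Char)) (w2c : PySem.Dict (List Char) Char) : Bool :=
  match lens with
  | [] => false
  | k :: ks =>
    let w := srem.take k
    if w2c.contains w then pvLoopA ch ptl srem ks c2w w2c        -- continue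
    else
      let c2w' := c2w.insert ch w
      let w2c' := w2c.insert w ch
      if pvBtkA ptl (srem.drop k) c2w' w2c' then true
      else pvLoopA ch ptl srem ks (c2w'.erase ch) (w2c'.erase w)  -- del, try next
termination_by (ptl.length + 1, lens.length + 1)
end

def word_pattern_ii (pattern : String) (s : String) : Bool :=
  pvBtkA pattern.toList s.toList PySem.Dict.empty PySem.Dict.empty

-- ===== PORT B =====
-- DFS state: (pattern-rest, s-rest, char→word map, word→char map).
abbrev pvSt : Type := List Char × List Char × PySem.Dict Char (List Char) × PySem.Dict (List Char) Char

-- termination measure for the while loop: sum over the stack of 3^|s-rest| * 2^|pattern-rest|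
def pvMu (st : pvSt) : Nat := 3 ^ st.2.1.length * 2 ^ st.1.length
def pvM (stack : List pvSt) : Nat := (stack.map pvMu).sum

theorem pvMu_pos (st : pvSt) : 0 < pvMu st :=
  Nat.mul_pos (Nat.pow_pos (by norm_num)) (Nat.pow_pos (by norm_num))

theorem pvM_cons (st : pvSt) (rest : List pvSt) : pvM (st :: rest) = pvMu st + pvM rest := by
  simp [pvM]

theorem pvM_rest_lt (st : pvSt) (rest : List pvSt) : pvM rest < pvM (st :: rest) := by
  have := pvMu_pos st; rw [pvM_cons]; omega

theorem pvMu_tail_lt (ch : Char) (ptl srem t : List Char)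
    (c : PySem.Dict Char (List Char)) (w : PySem.Dict (List Char) Char)
    (c' : PySem.Dict Char (List Char)) (w' : PySem.Dict (List Char) Char)
    (h : t.length ≤ srem.length) :
    pvMu (ptl, t, c, w) < pvMu (ch :: ptl, srem, c', w') := by
  simp only [pvMu, List.length_cons]
  calc 3 ^ t.length * 2 ^ ptl.length
      ≤ 3 ^ srem.length * 2 ^ ptl.length :=
        Nat.mul_le_mul_right _ (Nat.pow_le_pow_right (by norm_num) h)
    _ < 3 ^ srem.length * 2 ^ (ptl.length + 1) :=
        Nat.mul_lt_mul_of_le_of_lt (le_refl _)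
          (Nat.pow_lt_pow_right (by norm_num) (by omega)) (Nat.pow_pos (by norm_num))

theorem pvGeo (n : Nat) :
    ((List.range' 1 n).map (fun k => 3 ^ (n - k))).sum * 2 + 1 = 3 ^ n := by
  induction n with
  | zero => simp
  | succ n ih =>
    rw [List.range'_1_concat, List.map_append, List.sum_append]
    have hc : ∀ k ∈ List.range' 1 n, 3 ^ (n + 1 - k) = 3 * 3 ^ (n - k) := by
      intro k hk
      have := List.mem_range'_1.mp hk
      have : n + 1 - k = (n - k) + 1 := by omega
      rw [this, pow_succ]; ring
    rw [List.map_congr_left hc, List.sum_map_mul_left]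
    simp only [List.map_cons, List.map_nil, List.sum_cons, List.sum_nil]
    have : n + 1 - (1 + n) = 0 := by omega
    rw [this]
    have h3 : (3:Nat) ^ (n + 1) = 3 * 3 ^ n := by rw [pow_succ]; ring
    omega

theorem pvSuccs_sum_lt (ch : Char) (ptl srem : List Char)
    (p : Nat → Bool) (f1 : Nat → PySem.Dict Char (List Char))
    (f2 : Nat → PySem.Dict (List Char) Char)
    (c : PySem.Dict Char (List Char)) (w : PySem.Dict (List Char) Char) :
    pvM (((List.range' 1 srem.length).filter p).map
        (fun k => ((ptl, srem.drop k, f1 k, f2 k) : pvSt)))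
      < pvMu (ch :: ptl, srem, c, w) := by
  set n := srem.length with hn
  have hmm : pvM (((List.range' 1 n).filter p).map
      (fun k => ((ptl, srem.drop k, f1 k, f2 k) : pvSt)))
      = (((List.range' 1 n).filter p).map (fun k => 3 ^ (n - k) * 2 ^ ptl.length)).sum := by
    simp only [pvM, List.map_map]
    congr 1
    apply List.map_congr_left
    intro k _
    simp [pvMu, List.length_drop, hn]
  rw [hmm]
  have hsub : (((List.range' 1 n).filter p).map (fun k => 3 ^ (n - k) * 2 ^ ptl.length)).sum
      ≤ ((List.range' 1 n).map (fun k => 3 ^ (n - k) * 2 ^ ptl.length)).sum :=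
    List.Sublist.sum_le_sum (List.Sublist.map _ List.filter_sublist) (by intro a _; omega)
  have hfac : ((List.range' 1 n).map (fun k => 3 ^ (n - k) * 2 ^ ptl.length)).sum
      = ((List.range' 1 n).map (fun k => 3 ^ (n - k))).sum * 2 ^ ptl.length :=
    List.sum_map_mul_right _ _ _
  have hgeo := pvGeo n
  have h2 : 0 < 2 ^ ptl.length := Nat.pow_pos (by norm_num)
  simp only [pvMu, List.length_cons]
  have hS : ((List.range' 1 n).map (fun k => 3 ^ (n - k))).sum < 3 ^ n := by omega
  calc (((List.range' 1 n).filter p).map (fun k => 3 ^ (n - k) * 2 ^ ptl.length)).sum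
      ≤ ((List.range' 1 n).map (fun k => 3 ^ (n - k))).sum * 2 ^ ptl.length := by
        rw [← hfac]; exact hsub
    _ < 3 ^ n * 2 ^ ptl.length := Nat.mul_lt_mul_of_lt_of_le hS (le_refl _) h2
    _ ≤ 3 ^ n * 2 ^ (ptl.length + 1) :=
        Nat.mul_le_mul_left _ (Nat.pow_le_pow_right (by norm_num) (by omega))

-- the while loop of B: pop a state, decide, push successors (copies, no undo)
def pvDfsB : List pvSt → Bool
  | [] => false
  | (prem, srem, c2w, w2c) :: rest =>
    match prem with
    | [] => if srem.isEmpty then true else pvDfsB rest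
    | ch :: ptl =>
      if srem.isEmpty then pvDfsB rest
      else
        match c2w.get? ch with
        | some w =>
          if w.isPrefixOf srem then pvDfsB ((ptl, srem.drop w.length, c2w, w2c) :: rest)
          else pvDfsB rest
        | none =>
          pvDfsB ((((List.range' 1 srem.length).filter
              (fun k => !(w2c.contains (srem.take k)))).map
              (fun k => ((ptl, srem.drop k, c2w.insert ch (srem.take k),
                          w2c.insert (srem.take k) ch) : pvSt))).reverse ++ rest)
termination_by stack => pvM stack
decreasing_by
  · exact pvM_rest_lt _ _
  · exact pvM_rest_lt _ _
  · rw [pvM_cons, pvM_cons]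
    have := pvMu_tail_lt ch ptl srem (srem.drop w.length) c2w w2c c2w w2c
      (by rw [List.length_drop]; omega)
    omega
  · exact pvM_rest_lt _ _
  · rw [pvM_cons]
    have h1 : pvM ((((List.range' 1 srem.length).filter
        (fun k => !(w2c.contains (srem.take k)))).map
        (fun k => ((ptl, srem.drop k, c2w.insert ch (srem.take k),
                    w2c.insert (srem.take k) ch) : pvSt))).reverse ++ rest)
        = pvM (((List.range' 1 srem.length).filter
        (fun k => !(w2c.contains (srem.take k)))).map
        (fun k => ((ptl, srem.drop k, c2w.insert ch (srem.take k),
                    w2c.insert (srem.take k) ch) : pvSt))) + pvM rest := by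
      simp [pvM, List.map_reverse, List.sum_reverse]
    rw [h1]
    have := pvSuccs_sum_lt ch ptl srem (fun k => !(w2c.contains (srem.take k)))
      (fun k => c2w.insert ch (srem.take k)) (fun k => w2c.insert (srem.take k) ch) c2w w2c
    omega

def word_pattern_ii_alt (pattern : String) (s : String) : Bool :=
  pvDfsB [(pattern.toList, s.toList, PySem.Dict.empty, PySem.Dict.empty)]

-- ===== PRECONDITION & SPEC =====
def Spec_word_pattern_ii (pattern : String) (s : String) (out : Bool) : Prop := out = word_pattern_ii_alt pattern s
instance (pattern : String) (s : String) (out : Bool) : Decidable (Spec_word_pattern_ii pattern s out) := by unfold Spec_word_pattern_ii; infer_instance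

-- ===== CLAIM (what is proved, stated in full; the proofs are below) =====
def Claim_equal_word_pattern_ii : Prop := ∀ (pattern : String) (s : String), Dom_word_pattern_ii pattern s → Spec_word_pattern_ii pattern s (word_pattern_ii pattern s)

-- ===== LEMMAS AND PROOFS =====

-- 'del d[k]' right after a fresh 'd[k] = v' restores d
theorem pvErase_insert {κ ν : Type} [BEq κ] [LawfulBEq κ] (d : PySem.Dict κ ν) (k : κ) (v : ν)
    (h : d.contains k = false) : (d.insert k v).erase k = d := by
  have h2 : ∀ (a : κ) (b : ν), (a, b) ∈ d.items → ¬a = k := by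
    simpa [PySem.Dict.contains] using h
  have hall : ∀ p ∈ d.items, (!(p.1 == k)) = true := by
    intro p hp
    obtain ⟨a, b⟩ := p
    simpa using h2 a b hp
  apply PySem.Dict.ext
  simp only [PySem.Dict.insert, PySem.Dict.erase, h, Bool.false_eq_true, if_false,
    List.filter_append]
  rw [List.filter_eq_self.mpr hall]
  simp

-- A's inner for-loop is an ∃-scan over the candidate lengths
theorem pvLoopA_any (ch : Char) (ptl srem : List Char) (lens : List Nat)
    (c2w : PySem.Dict Char (List Char)) (w2c : PySem.Dict (List Char) Char)
    (hch : c2w.contains ch = false) :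
    pvLoopA ch ptl srem lens c2w w2c
      = lens.any (fun k => !(w2c.contains (srem.take k)) &&
          pvBtkA ptl (srem.drop k) (c2w.insert ch (srem.take k))
            (w2c.insert (srem.take k) ch)) := by
  induction lens with
  | nil => rw [pvLoopA]; simp
  | cons k ks ih =>
    rw [pvLoopA]
    simp only [List.any_cons]
    by_cases hw : w2c.contains (srem.take k) = true
    · simp [hw, ih]
    · have hw' : w2c.contains (srem.take k) = false := by simpa using hw
      simp only [hw', Bool.false_eq_true, if_false, Bool.not_false, Bool.true_and]
      by_cases hb : pvBtkA ptl (srem.drop k) (c2w.insert ch (srem.take k))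
          (w2c.insert (srem.take k) ch) = true
      · simp [hb]
      · have hb' : pvBtkA ptl (srem.drop k) (c2w.insert ch (srem.take k))
            (w2c.insert (srem.take k) ch) = false := by simpa using hb
        simp only [hb', Bool.false_eq_true, if_false, Bool.false_or]
        rw [pvErase_insert c2w ch (srem.take k) hch,
            pvErase_insert w2c (srem.take k) ch hw']
        exact ih

-- B's DFS answers: does some stacked state lead to success (= A's backtrack)?
theorem pvDfsB_any (stack : List pvSt) :
    pvDfsB stack = stack.any (fun st => pvBtkA st.1 st.2.1 st.2.2.1 st.2.2.2) := by
  induction stack using pvDfsB.induct with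
  | case1 => rw [pvDfsB]; simp
  | case2 srem c2w w2c rest hse =>
    rw [pvDfsB]
    simp only [hse, if_true, List.any_cons]
    rw [pvBtkA]
    simp [hse]
  | case3 srem c2w w2c rest hse ih =>
    rw [pvDfsB]
    simp only [hse, List.any_cons, ih]
    rw [pvBtkA]
    simp [hse]
  | case4 srem c2w w2c rest ch ptl hse ih =>
    rw [pvDfsB]
    simp only [hse, if_true, List.any_cons, ih]
    rw [pvBtkA]
    simp [hse]
  | case5 srem c2w w2c rest ch ptl hse w hw hpre ih =>
    rw [pvDfsB]
    simp only [hse, hw, hpre, if_true, ih, List.any_cons]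
    rw [pvBtkA]
    simp [hse, hw, hpre]
  | case6 srem c2w w2c rest ch ptl hse w hw hpre ih =>
    rw [pvDfsB]
    simp only [hse, hw, hpre, ih, List.any_cons]
    rw [pvBtkA]
    simp [hse, hw, hpre]
  | case7 srem c2w w2c rest ch ptl hse hw ih =>
    rw [pvDfsB]
    simp only [hse, hw, ih, List.any_append, List.any_reverse,
      List.any_map, List.any_filter, List.any_cons]
    rw [pvBtkA]
    simp only [hse, hw]
    rw [pvLoopA_any ch ptl srem _ c2w w2c
      ((PySem.Dict.get?_eq_none_iff_contains c2w ch).mp hw)]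
    rfl

-- ===== VERDICT (by name: the statement is the Claim_ definition above) =====
theorem word_pattern_ii_spec : Claim_equal_word_pattern_ii := by
  intro pattern s _
  unfold Spec_word_pattern_ii word_pattern_ii word_pattern_ii_alt
  rw [pvDfsB_any]
  simp
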